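-- pv_equiv track=rewrite | github.com/skhbolla/unfettered-dsa | GFG-Maximum-Value-Of-Expression/solution.py | first_optimization
-- ===== SOURCE A (Python) =====
-- def first_optimization(arr: list[int]) -> int:
--     '''Realize that, for a pair of chosen i and j
--     the value of expression stays the same
--     for both (i,j) and (j,i).
--     So we are making a lot of unnecessary repeated calculations.
--     Instead of running the inner loop from 0 to n ; let's run it
--     from i to n. This will ensure that we dont perform
--     the above mentioned symmetric calculations.'''
--     n = len(arr)
--     sol = 0
--     for i in range(0,n):
--         for j in range(i,n):
--             expr = abs(arr[i] - arr[j]) + abs(i-j)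
--             if expr > sol:
--                 sol = expr
--
--     return sol
-- ===== SOURCE B (Python) =====
-- def first_optimization(arr: list[int]) -> int:
--     # O(n): |arr[i]-arr[j]| + |i-j| = max over signs of ((arr[i]+i)-(arr[j]+j))
--     # and ((arr[i]-i)-(arr[j]-j)); so the answer is the larger of the two ranges.
--     if not arr:
--         return 0
--     p = [v + i for i, v in enumerate(arr)]
--     m = [v - i for i, v in enumerate(arr)]
--     return max(max(p) - min(p), max(m) - min(m))
-- ===== Notes on version B (the rewrite author's own statement) =====
-- stated objective: faster
-- what changed: replaces the quadratic all-pairs scan by the standard sign-expansion identity: the answer is the larger of the ranges (max-min) of arr[i]+i and arr[i]-i, computed in one pass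
import Mathlib
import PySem

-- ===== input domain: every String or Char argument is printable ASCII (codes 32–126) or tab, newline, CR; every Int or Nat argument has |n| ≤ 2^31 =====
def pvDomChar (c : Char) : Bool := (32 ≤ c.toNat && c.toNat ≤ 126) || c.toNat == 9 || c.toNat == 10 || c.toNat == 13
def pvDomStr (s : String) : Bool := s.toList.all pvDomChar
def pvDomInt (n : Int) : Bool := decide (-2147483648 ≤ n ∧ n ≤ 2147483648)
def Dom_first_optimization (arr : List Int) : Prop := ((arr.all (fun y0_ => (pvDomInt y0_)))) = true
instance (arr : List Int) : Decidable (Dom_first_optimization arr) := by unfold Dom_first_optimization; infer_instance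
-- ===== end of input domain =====

-- B replaces A's quadratic all-pairs scan by a linear max-min pass over arr[i]+i and arr[i]-i (faster).

-- ===== PORT A =====
def first_optimization (arr : List Int) : Int :=
  let n : Int := arr.length
  (PySem.List.pyRange 0 n).foldl (fun sol i =>
    (PySem.List.pyRange i n).foldl (fun sol j =>
      let expr := |PySem.List.pyGetD arr i 0 - PySem.List.pyGetD arr j 0| + |i - j|
      if expr > sol then expr else sol) sol) 0

-- ===== PORT B =====
def first_optimization_alt (arr : List Int) : Int :=
  if arr = [] then 0
  else
    let p := (PySem.List.enumerate arr).map (fun iv => iv.2 + iv.1)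
    let m := (PySem.List.enumerate arr).map (fun iv => iv.2 - iv.1)
    max ((PySem.List.max? p (fun y => y)).getD 0 - (PySem.List.min? p (fun y => y)).getD 0)
        ((PySem.List.max? m (fun y => y)).getD 0 - (PySem.List.min? m (fun y => y)).getD 0)

-- ===== PRECONDITION & SPEC =====
def Spec_first_optimization (arr : List Int) (out : Int) : Prop := out = first_optimization_alt arr
instance (arr : List Int) (out : Int) : Decidable (Spec_first_optimization arr out) := by unfold Spec_first_optimization; infer_instance

-- ===== CLAIM (what is proved, stated in full; the proofs are below) =====
def Claim_equal_first_optimization : Prop := ∀ (arr : List Int), Dom_first_optimization arr → Spec_first_optimization arr (first_optimization arr)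

-- ===== LEMMAS AND PROOFS =====

-- expression A maximizes over a pair of indices
def pvExprAt (arr : List Int) (i j : Int) : Int :=
  |PySem.List.pyGetD arr i 0 - PySem.List.pyGetD arr j 0| + |i - j|

-- generic: a fold whose step is "≤ c iff state ≤ c and Q x c" keeps that shape
theorem pv_foldl_le_iff {α : Type} (f : Int → α → Int) (Q : α → Int → Prop)
    (h : ∀ s x c, f s x ≤ c ↔ (s ≤ c ∧ Q x c)) :
    ∀ (L : List α) (s c : Int), L.foldl f s ≤ c ↔ (s ≤ c ∧ ∀ x ∈ L, Q x c) := by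
  intro L
  induction L with
  | nil => simp
  | cons x t ih =>
    intro s c
    simp only [List.foldl_cons, ih, h, List.mem_cons]
    constructor
    · rintro ⟨⟨h1, h2⟩, h3⟩
      exact ⟨h1, fun y hy => by rcases hy with rfl | hy; exact h2; exact h3 y hy⟩
    · rintro ⟨h1, h2⟩
      exact ⟨⟨h1, h2 x (Or.inl rfl)⟩, fun y hy => h2 y (Or.inr hy)⟩

theorem pv_step_le_iff (e s c : Int) : (if e > s then e else s) ≤ c ↔ (s ≤ c ∧ e ≤ c) := by
  split_ifs with h <;> omega

theorem pv_A_le_iff (arr : List Int) (c : Int) :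
    first_optimization arr ≤ c ↔
      (0 ≤ c ∧ ∀ i ∈ PySem.List.pyRange 0 (arr.length : Int),
        ∀ j ∈ PySem.List.pyRange i (arr.length : Int), pvExprAt arr i j ≤ c) := by
  show (PySem.List.pyRange 0 (arr.length : Int)).foldl _ 0 ≤ c ↔ _
  rw [pv_foldl_le_iff _
      (fun i c => ∀ j ∈ PySem.List.pyRange i (arr.length : Int), pvExprAt arr i j ≤ c)]
  intro s i c'
  rw [pv_foldl_le_iff _ (fun j c'' => pvExprAt arr i j ≤ c'')]
  intro s' j c''
  exact pv_step_le_iff _ _ _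

theorem pv_getD_nat (arr : List Int) (k : Nat) (hk : k < arr.length) :
    PySem.List.pyGetD arr (k : Int) 0 = arr[k] := by
  simp [List.getD_eq_getElem?_getD, List.getElem?_eq_getElem hk]

theorem pv_mem_map_enum {arr : List Int} (g : Int → Int → Int) (k : Nat) (hk : k < arr.length) :
    g arr[k] k ∈ (PySem.List.enumerate arr).map (fun iv => g iv.2 iv.1) := by
  refine List.mem_map.mpr ⟨((k : Int), arr[k]), ?_, by simp⟩
  rw [PySem.List.mem_enumerate_iff]
  exact ⟨k, hk, by simp⟩

theorem pv_mem_map_enum_elim {arr : List Int} {g : Int → Int → Int} {y : Int}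
    (hy : y ∈ (PySem.List.enumerate arr).map (fun iv => g iv.2 iv.1)) :
    ∃ (k : Nat), ∃ (h : k < arr.length), y = g arr[k] k := by
  rcases List.mem_map.mp hy with ⟨iv, hmem, rfl⟩
  rcases (PySem.List.mem_enumerate_iff arr 0 iv).mp hmem with ⟨k, hk, rfl⟩
  exact ⟨k, hk, by simp⟩

-- A dominates every |arr[k]-arr[l]| + |k-l| (indices as Nats)
theorem pv_A_ge (arr : List Int) (k l : Nat) (hk : k < arr.length) (hl : l < arr.length) :
    |arr[k] - arr[l]| + |(k : Int) - (l : Int)| ≤ first_optimization arr := by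
  have h := (pv_A_le_iff arr (first_optimization arr)).mp le_rfl
  have hgk := pv_getD_nat arr k hk
  have hgl := pv_getD_nat arr l hl
  rcases Nat.le_total k l with hkl | hkl
  · have h2 := h.2 (k : Int) (PySem.List.mem_pyRange_one.mpr (by omega))
      (l : Int) (PySem.List.mem_pyRange_one.mpr (by omega))
    simp only [pvExprAt, hgk, hgl] at h2
    exact h2
  · have h2 := h.2 (l : Int) (PySem.List.mem_pyRange_one.mpr (by omega))
      (k : Int) (PySem.List.mem_pyRange_one.mpr (by omega))
    simp only [pvExprAt, hgk, hgl, abs_sub_comm arr[l] arr[k],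
      abs_sub_comm ((l : Int)) ((k : Int))] at h2
    exact h2

-- ===== VERDICT (by name: the statement is the Claim_ definition above) =====
theorem first_optimization_spec : Claim_equal_first_optimization := by
  intro arr _
  unfold Spec_first_optimization
  by_cases hnil : arr = []
  · subst hnil
    simp [first_optimization, first_optimization_alt, PySem.List.pyRange_one_eq_nil le_rfl]
  · -- nonempty: name the four extrema of B
    set P := (PySem.List.enumerate arr).map (fun iv => iv.2 + iv.1) with hPdef
    set M := (PySem.List.enumerate arr).map (fun iv => iv.2 - iv.1) with hMdef
    have hPne : P ≠ [] := by
      simp [hPdef, PySem.List.enumerate_eq_zipIdx_map, hnil]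
    have hMne : M ≠ [] := by
      simp [hMdef, PySem.List.enumerate_eq_zipIdx_map, hnil]
    rcases hMp : PySem.List.max? P (fun y => y) with _ | Mp
    · exact absurd ((PySem.List.max?_eq_none_iff _ _).mp hMp) hPne
    rcases hmp : PySem.List.min? P (fun y => y) with _ | mp
    · exact absurd ((PySem.List.min?_eq_none_iff _ _).mp hmp) hPne
    rcases hMm : PySem.List.max? M (fun y => y) with _ | Mm
    · exact absurd ((PySem.List.max?_eq_none_iff _ _).mp hMm) hMne
    rcases hmm : PySem.List.min? M (fun y => y) with _ | mm
    · exact absurd ((PySem.List.min?_eq_none_iff _ _).mp hmm) hMne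
    have hB : first_optimization_alt arr = max (Mp - mp) (Mm - mm) := by
      simp [first_optimization_alt, hnil, ← hPdef, ← hMdef, hMp, hmp, hMm, hmm]
    rw [hB]
    have hMpMax := PySem.List.max?_isMax hMp
    have hmpMin := PySem.List.min?_isMin hmp
    have hMmMax := PySem.List.max?_isMax hMm
    have hmmMin := PySem.List.min?_isMin hmm
    apply le_antisymm
    · -- A ≤ B, via the ≤-characterization with c := B
      rw [pv_A_le_iff]
      constructor
      · have h0 : mp ≤ Mp := by simpa using hMpMax mp (PySem.List.min?_mem hmp)
        simp only [le_max_iff]; left; omega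
      · intro i hi j hj
        have hi' := PySem.List.mem_pyRange_one.mp hi
        have hj' := PySem.List.mem_pyRange_one.mp hj
        set k := i.toNat with hkdef
        set l := j.toNat with hldef
        have hk : k < arr.length := by omega
        have hl : l < arr.length := by omega
        have hik : i = (k : Int) := by omega
        have hjl : j = (l : Int) := by omega
        have e1 : PySem.List.pyGetD arr i 0 = arr[k] := by rw [hik]; exact pv_getD_nat arr k hk
        have e2 : PySem.List.pyGetD arr j 0 = arr[l] := by rw [hjl]; exact pv_getD_nat arr l hl
        have hE : pvExprAt arr i j = |arr[k] - arr[l]| + (j - i) := by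
          simp only [pvExprAt, e1, e2]
          congr 1
          rw [abs_of_nonpos (by omega : i - j ≤ 0)]
          omega
        rw [hE]
        rcases le_total arr[l] arr[k] with hc | hc
        · have h1 : arr[k] - k ≤ Mm := by
            simpa using hMmMax _ (pv_mem_map_enum (fun v i => v - i) k hk)
          have h2 : mm ≤ arr[l] - l := by
            simpa using hmmMin _ (pv_mem_map_enum (fun v i => v - i) l hl)
          rw [abs_of_nonneg (by omega : (0:Int) ≤ arr[k] - arr[l])]
          simp only [le_max_iff]; right; omega
        · have h1 : arr[l] + l ≤ Mp := by
            simpa using hMpMax _ (pv_mem_map_enum (fun v i => v + i) l hl)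
          have h2 : mp ≤ arr[k] + k := by
            simpa using hmpMin _ (pv_mem_map_enum (fun v i => v + i) k hk)
          rw [abs_of_nonpos (by omega : arr[k] - arr[l] ≤ 0)]
          simp only [le_max_iff]; left; omega
    · -- B ≤ A
      simp only [max_le_iff]
      constructor
      · rcases pv_mem_map_enum_elim (PySem.List.max?_mem hMp) with ⟨k, hk, rfl⟩
        rcases pv_mem_map_enum_elim (PySem.List.min?_mem hmp) with ⟨l, hl, rfl⟩
        have hA := pv_A_ge arr k l hk hl
        have h1 : arr[k] - arr[l] ≤ |arr[k] - arr[l]| := le_abs_self _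
        have h2 : (k : Int) - (l : Int) ≤ |(k : Int) - (l : Int)| := le_abs_self _
        omega
      · rcases pv_mem_map_enum_elim (PySem.List.max?_mem hMm) with ⟨k, hk, rfl⟩
        rcases pv_mem_map_enum_elim (PySem.List.min?_mem hmm) with ⟨l, hl, rfl⟩
        have hA := pv_A_ge arr k l hk hl
        have h1 : arr[k] - arr[l] ≤ |arr[k] - arr[l]| := le_abs_self _
        have h2 : (l : Int) - (k : Int) ≤ |(k : Int) - (l : Int)| := (abs_sub_comm ((k:Int)) ((l:Int))) ▸ le_abs_self _
        omega
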